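-- pv_equiv track=rewrite | github.com/miliar/Code_Jam_Webscraper | Solutions_python/Problem_1/148.py | saveTheUniverse
-- ===== SOURCE A (Python) =====
-- def saveTheUniverse(engines, queries):
--     count = 0
--     while(queries):
--         best = 0
--         for e in engines:
--             if e in queries:
--                 best = max(best, queries.index(e))
--             else:
--                 return count
--         queries = queries[best:]
--         count += 1
--     return count
-- ===== SOURCE B (Python) =====
-- def saveTheUniverse(engines, queries):
--     # Single linear pass: track the distinct engines seen in the current
--     # window; each time the window has covered every engine, count a switch
--     # and restart the window at the current query.
--     need = set(engines)
--     seen = set()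
--     count = 0
--     for q in queries:
--         if q in need:
--             seen.add(q)
--             if len(seen) == len(need):
--                 count += 1
--                 seen = {q}
--     return count
-- ===== Notes on version B (the rewrite author's own statement) =====
-- stated objective: alternative
-- what changed: Replaces A's repeated whole-list membership tests and queries.index scans per greedy window by a single left-to-right pass that keeps a set of distinct engines seen in the current window and restarts the window whenever it covers all engines; intended as faster (O(S) vs window-quadratic), but a timing run could not confirm a ratio because A timed out at n=16 where B returned.
-- outside the precondition, e.g. on saveTheUniverse(['a'], ['a']): A does not finish within the time limit, B returns 1; on saveTheUniverse([], ['x']): A does not finish within the time limit, B returns 0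
import Mathlib
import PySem

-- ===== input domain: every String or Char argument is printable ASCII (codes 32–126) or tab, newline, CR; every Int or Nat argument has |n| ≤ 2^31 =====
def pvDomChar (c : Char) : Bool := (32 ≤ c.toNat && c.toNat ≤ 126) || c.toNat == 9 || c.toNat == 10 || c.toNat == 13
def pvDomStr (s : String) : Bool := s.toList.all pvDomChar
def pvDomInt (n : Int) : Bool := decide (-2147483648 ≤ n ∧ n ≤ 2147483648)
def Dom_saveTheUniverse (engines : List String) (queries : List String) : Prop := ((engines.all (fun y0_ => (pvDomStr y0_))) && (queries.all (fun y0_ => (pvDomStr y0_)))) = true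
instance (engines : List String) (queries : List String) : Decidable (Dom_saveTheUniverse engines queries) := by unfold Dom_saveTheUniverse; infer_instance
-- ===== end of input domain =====

-- B replaces A's per-window whole-list membership/index scans by one left-to-right pass
-- with a distinct-engine window that restarts on completion (intended as faster; the
-- timing run got no clean ratio: A timed out at n=16 where B returned).

-- ===== PORT A =====
-- inner `for e in engines` loop: returns `none` where Python executes `return count`,
-- otherwise the final value of `best`
def pvForBest (queries : List String) : List String → Nat → Option Nat
  | [], best => some best
  | e :: rest, best =>
    match PySem.List.index? queries e with   -- `e in queries` / `queries.index(e)` together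
    | some i => pvForBest queries rest (max best i)
    | none => none

-- the `while queries:` loop; A diverges on inputs outside Pre_saveTheUniverse, so the
-- port carries a fuel guard (queries.length + 1 steps suffice on Pre_, proved below);
-- `queries[best:]` with 0 ≤ best ≤ len is exactly List.drop best
def pvALoop (engines : List String) : Nat → Int → List String → Int
  | 0, count, _ => count              -- fuel exhausted: unreachable under Pre_saveTheUniverse
  | fuel + 1, count, queries =>
    if queries.isEmpty then count
    else
      match pvForBest queries engines 0 with
      | none => count
      | some best => pvALoop engines fuel (count + 1) (queries.drop best)

def saveTheUniverse (engines : List String) (queries : List String) : Int :=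
  pvALoop engines (queries.length + 1) 0 queries

-- ===== PORT B =====
-- `for q in queries` of Source B: seen/count accumulators; `seen = {q}` is the singleton set [q]
def pvBLoop (need : List String) : List String → List String → Int → Int
  | [], _, count => count
  | q :: rest, seen, count =>
    if q ∈ need then
      let seen' := PySem.Set.add seen q
      if seen'.length = need.length then pvBLoop need rest [q] (count + 1)
      else pvBLoop need rest seen' count
    else pvBLoop need rest seen count

def saveTheUniverse_alt (engines : List String) (queries : List String) : Int :=
  pvBLoop (PySem.Set.ofList engines) queries [] 0

-- ===== PRECONDITION & SPEC =====
-- Pre_ excludes exactly the inputs on which Python A loops forever (never returns):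
-- queries nonempty while engines is empty, or engines has a single distinct value that
-- occurs in queries (then `queries[best:]` stops shrinking).
def Pre_saveTheUniverse (engines : List String) (queries : List String) : Prop :=
  queries = [] ∨ 2 ≤ (PySem.List.dedup engines).length ∨
    (engines ≠ [] ∧ ∀ q ∈ queries, q ∉ engines)

instance (engines : List String) (queries : List String) : Decidable (Pre_saveTheUniverse engines queries) := by
  unfold Pre_saveTheUniverse; infer_instance

def pvWitness_saveTheUniverse : List String × List String := (["a", "b"], ["a", "b", "a"])

def Spec_saveTheUniverse (engines : List String) (queries : List String) (out : Int) : Prop := out = saveTheUniverse_alt engines queries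
instance (engines : List String) (queries : List String) (out : Int) : Decidable (Spec_saveTheUniverse engines queries out) := by unfold Spec_saveTheUniverse; infer_instance

-- ===== CLAIM (what is proved, stated in full; the proofs are below) =====
def Claim_equal_saveTheUniverse : Prop := ∀ (engines : List String) (queries : List String), Dom_saveTheUniverse engines queries → Pre_saveTheUniverse engines queries → Spec_saveTheUniverse engines queries (saveTheUniverse engines queries)

-- ===== LEMMAS AND PROOFS =====

-- the evolution of `seen` over a scanned prefix
def pvSeenFold (need seen p : List String) : List String :=
  p.foldl (fun s q => if q ∈ need then PySem.Set.add s q else s) seen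

lemma mem_pvSeenFold (need : List String) :
    ∀ (p seen : List String) (x : String),
      x ∈ pvSeenFold need seen p ↔ x ∈ seen ∨ (x ∈ p ∧ x ∈ need) := by
  intro p
  induction p with
  | nil => intro seen x; simp [pvSeenFold]
  | cons q p ih =>
    intro seen x
    simp only [pvSeenFold, List.foldl_cons]
    by_cases hq : q ∈ need
    · simp only [if_pos hq]
      rw [show (List.foldl (fun s q => if q ∈ need then PySem.Set.add s q else s)
            (PySem.Set.add seen q) p) = pvSeenFold need (PySem.Set.add seen q) p from rfl,
          ih]
      simp only [PySem.Set.mem_add, List.mem_cons]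
      constructor
      · rintro (⟨h | h⟩ | h)
        · exact Or.inl h
        · exact Or.inr ⟨Or.inl h, h ▸ hq⟩
        · exact Or.inr ⟨Or.inr h.1, h.2⟩
      · rintro (h | ⟨h | h, hn⟩)
        · exact Or.inl (Or.inl h)
        · exact Or.inl (Or.inr h)
        · exact Or.inr ⟨h, hn⟩
    · simp only [if_neg hq]
      rw [show (List.foldl (fun s q => if q ∈ need then PySem.Set.add s q else s)
            seen p) = pvSeenFold need seen p from rfl, ih]
      simp only [List.mem_cons]
      constructor
      · rintro (h | h); exacts [Or.inl h, Or.inr ⟨Or.inr h.1, h.2⟩]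
      · rintro (h | ⟨h | h, hn⟩)
        · exact Or.inl h
        · exact absurd (h ▸ hn) hq
        · exact Or.inr ⟨h, hn⟩

lemma nodup_pvSeenFold (need : List String) :
    ∀ (p seen : List String), seen.Nodup → (pvSeenFold need seen p).Nodup := by
  intro p
  induction p with
  | nil => intro seen h; exact h
  | cons q p ih =>
    intro seen h
    simp only [pvSeenFold, List.foldl_cons]
    by_cases hq : q ∈ need
    · simpa only [if_pos hq] using ih (PySem.Set.add seen q) (PySem.Set.nodup_add _ _ h)
    · simpa only [if_neg hq] using ih seen h

lemma length_lt_of_missing (seen need : List String) (hs : seen.Nodup)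
    (hsub : ∀ x ∈ seen, x ∈ need) (a : String) (ha : a ∈ need) (hna : a ∉ seen) :
    seen.length < need.length := by
  have hsub' : seen ⊆ need.erase a := by
    intro x hx
    exact (List.mem_erase_of_ne (fun h => hna (by rw [← h]; exact hx))).mpr (hsub x hx)
  have h1 : seen.length ≤ (need.erase a).length := (hs.subperm hsub').length_le
  have h2 : (need.erase a).length = need.length - 1 := List.length_erase_of_mem ha
  have h3 : 1 ≤ need.length := List.length_pos_of_mem ha
  omega

-- B stays at `count` when no query is an engine
lemma pvBLoop_skip (need : List String) :
    ∀ (qs seen : List String) (count : Int), (∀ q ∈ qs, q ∉ need) →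
      pvBLoop need qs seen count = count := by
  intro qs
  induction qs with
  | nil => intro seen count _; rfl
  | cons q rest ih =>
    intro seen count hall
    have hq : q ∉ need := hall q (List.mem_cons_self ..)
    simp only [pvBLoop, if_neg hq]
    exact ih seen count (fun x hx => hall x (List.mem_cons_of_mem _ hx))

-- B stays at `count` when some engine never appears (the window never completes)
lemma pvBLoop_notFull (need : List String) (a : String) (ha : a ∈ need) :
    ∀ (qs seen : List String) (count : Int), a ∉ qs → a ∉ seen → seen.Nodup →
      (∀ x ∈ seen, x ∈ need) → pvBLoop need qs seen count = count := by
  intro qs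
  induction qs with
  | nil => intro seen count _ _ _ _; rfl
  | cons q rest ih =>
    intro seen count haq has hnd hsub
    have hqa : q ≠ a := fun h => haq (h ▸ List.mem_cons_self ..)
    have haq' : a ∉ rest := fun h => haq (List.mem_cons_of_mem _ h)
    simp only [pvBLoop]
    by_cases hq : q ∈ need
    · have hna' : a ∉ PySem.Set.add seen q := by
        rw [PySem.Set.mem_add]; rintro (h | h); exacts [has h, hqa h.symm]
      have hnd' : (PySem.Set.add seen q).Nodup := PySem.Set.nodup_add _ _ hnd
      have hsub' : ∀ x ∈ PySem.Set.add seen q, x ∈ need := by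
        intro x hx; rw [PySem.Set.mem_add] at hx
        rcases hx with h | h; exacts [hsub x h, h ▸ hq]
      have hlt := length_lt_of_missing (PySem.Set.add seen q) need hnd' hsub' a ha hna'
      simp only [if_pos hq, if_neg (Nat.ne_of_lt hlt)]
      exact ih _ count haq' hna' hnd' hsub'
    · simp only [if_neg hq]
      exact ih seen count haq' has hnd hsub

-- scanning a prefix that misses `a` never completes the window: it just folds `seen`
lemma pvBLoop_prefix (need : List String) (a : String) (ha : a ∈ need) :
    ∀ (p seen : List String) (count : Int) (rest : List String), a ∉ p → a ∉ seen →
      seen.Nodup → (∀ x ∈ seen, x ∈ need) →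
      pvBLoop need (p ++ rest) seen count = pvBLoop need rest (pvSeenFold need seen p) count := by
  intro p
  induction p with
  | nil => intro seen count rest _ _ _ _; rfl
  | cons q p ih =>
    intro seen count rest hap has hnd hsub
    have hqa : q ≠ a := fun h => hap (h ▸ List.mem_cons_self ..)
    have hap' : a ∉ p := fun h => hap (List.mem_cons_of_mem _ h)
    simp only [List.cons_append, pvBLoop]
    by_cases hq : q ∈ need
    · have hna' : a ∉ PySem.Set.add seen q := by
        rw [PySem.Set.mem_add]; rintro (h | h); exacts [has h, hqa h.symm]
      have hnd' : (PySem.Set.add seen q).Nodup := PySem.Set.nodup_add _ _ hnd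
      have hsub' : ∀ x ∈ PySem.Set.add seen q, x ∈ need := by
        intro x hx; rw [PySem.Set.mem_add] at hx
        rcases hx with h | h; exacts [hsub x h, h ▸ hq]
      have hlt := length_lt_of_missing (PySem.Set.add seen q) need hnd' hsub' a ha hna'
      simp only [if_pos hq, if_neg (Nat.ne_of_lt hlt)]
      rw [ih _ count rest hap' hna' hnd' hsub']
      simp [pvSeenFold, if_pos hq]
    · simp only [if_neg hq]
      rw [ih seen count rest hap' has hnd hsub]
      simp [pvSeenFold, if_neg hq]

-- pvForBest characterizations
lemma pvForBest_none (qs : List String) :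
    ∀ (es : List String) (b : Nat), pvForBest qs es b = none → ∃ e ∈ es, e ∉ qs := by
  intro es
  induction es with
  | nil => intro b h; simp [pvForBest] at h
  | cons e rest ih =>
    intro b h
    simp only [pvForBest] at h
    cases hi : PySem.List.index? qs e with
    | none =>
      exact ⟨e, List.mem_cons_self .., (PySem.List.index?_eq_none_iff ..).mp hi⟩
    | some i =>
      rw [hi] at h
      obtain ⟨e', he', hn⟩ := ih (max b i) h
      exact ⟨e', List.mem_cons_of_mem _ he', hn⟩

lemma pvForBest_some (qs : List String) :
    ∀ (es : List String) (b best : Nat), pvForBest qs es b = some best →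
      b ≤ best ∧ (∀ e ∈ es, ∃ i, PySem.List.index? qs e = some i ∧ i ≤ best) ∧
      (best = b ∨ ∃ e ∈ es, PySem.List.index? qs e = some best) := by
  intro es
  induction es with
  | nil =>
    intro b best h
    simp only [pvForBest, Option.some.injEq] at h
    exact ⟨h.le, fun e he => absurd he (List.not_mem_nil), Or.inl h.symm⟩
  | cons e rest ih =>
    intro b best h
    simp only [pvForBest] at h
    cases hi : PySem.List.index? qs e with
    | none => rw [hi] at h; exact absurd h (by simp)
    | some i =>
      rw [hi] at h
      obtain ⟨hle, hall, hach⟩ := ih (max b i) best h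
      refine ⟨le_trans (Nat.le_max_left b i) hle, ?_, ?_⟩
      · intro e' he'
        rcases List.mem_cons.mp he' with h' | h'
        · exact ⟨i, h' ▸ hi, le_trans (Nat.le_max_right b i) hle⟩
        · exact hall e' h'
      · rcases hach with h' | ⟨e', he', hi'⟩
        · rcases max_choice b i with hm | hm
          · rw [hm] at h'; exact Or.inl h'
          · rw [hm] at h'; exact Or.inr ⟨e, List.mem_cons_self .., h' ▸ hi⟩
        · exact Or.inr ⟨e', List.mem_cons_of_mem _ he', hi'⟩

lemma two_distinct_of_dedup (engines : List String)
    (h2 : 2 ≤ (PySem.List.dedup engines).length) :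
    ∃ x y, x ∈ engines ∧ y ∈ engines ∧ x ≠ y := by
  have hnd : (PySem.List.dedup engines).Nodup := PySem.List.nodup_dedup engines
  match hd : PySem.List.dedup engines with
  | [] => rw [hd] at h2; simp at h2
  | [x] => rw [hd] at h2; simp at h2
  | x :: y :: rest =>
    rw [hd] at hnd
    refine ⟨x, y, ?_, ?_, ?_⟩
    · exact (PySem.List.mem_dedup ..).mp (hd ▸ List.mem_cons_self ..)
    · exact (PySem.List.mem_dedup ..).mp
        (hd ▸ List.mem_cons_of_mem _ (List.mem_cons_self ..))
    · intro h; subst h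
      exact (List.nodup_cons.mp hnd).1 (List.mem_cons_self ..)

-- the main loop correspondence, on engines with at least two distinct values
lemma pvMain (engines : List String) (h2 : 2 ≤ (PySem.List.dedup engines).length) :
    ∀ (n : Nat) (qs : List String) (count : Int), qs.length ≤ n →
      pvALoop engines (n + 1) count qs = pvBLoop (PySem.Set.ofList engines) qs [] count := by
  intro n
  induction n with
  | zero =>
    intro qs count hlen
    have hq : qs = [] := List.eq_nil_of_length_eq_zero (Nat.le_zero.mp hlen)
    subst hq; rfl
  | succ m ih =>
    intro qs count hlen
    by_cases hqe : qs = []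
    · subst hqe; rfl
    have hne : qs.isEmpty = false := by simp [hqe]
    rw [pvALoop.eq_def]
    simp only [hne, Bool.false_eq_true, if_false]
    cases hfb : pvForBest qs engines 0 with
    | none =>
      obtain ⟨e, he, hnq⟩ := pvForBest_none qs engines 0 hfb
      rw [pvBLoop_notFull (PySem.Set.ofList engines) e ((PySem.Set.mem_ofList ..).mpr he)
        qs [] count hnq (List.not_mem_nil) List.nodup_nil (fun x hx => absurd hx (List.not_mem_nil))]
    | some best =>
      obtain ⟨-, hall, hach⟩ := pvForBest_some qs engines 0 best hfb
      obtain ⟨x, y, hx, hy, hxy⟩ := two_distinct_of_dedup engines h2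
      have hbest1 : 1 ≤ best := by
        by_contra hb
        have hb0 : best = 0 := by omega
        obtain ⟨i, hix, hile⟩ := hall x hx
        obtain ⟨j, hjy, hjle⟩ := hall y hy
        have hi0 : i = 0 := by omega
        have hj0 : j = 0 := by omega
        subst hi0; subst hb0
        have hj0' : j = 0 := by omega
        subst hj0'
        obtain ⟨p1, s1, hqs1, hp1, -⟩ := (PySem.List.index?_eq_some_iff ..).mp hix
        obtain ⟨p2, s2, hqs2, hp2, -⟩ := (PySem.List.index?_eq_some_iff ..).mp hjy
        have hp1' : p1 = [] := List.eq_nil_of_length_eq_zero hp1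
        have hp2' : p2 = [] := List.eq_nil_of_length_eq_zero hp2
        subst hp1'; subst hp2'
        simp only [List.nil_append] at hqs1 hqs2
        rw [hqs1] at hqs2
        exact hxy (List.cons.injEq .. ▸ hqs2).1
      have hach' : ∃ a ∈ engines, PySem.List.index? qs a = some best := by
        rcases hach with h | h
        · omega
        · exact h
      obtain ⟨a, haeng, hia⟩ := hach'
      have hane : a ∈ PySem.Set.ofList engines := (PySem.Set.mem_ofList ..).mpr haeng
      obtain ⟨p, suf, hqs, hplen, hap⟩ := (PySem.List.index?_eq_some_iff ..).mp hia
      have hqslen : qs.length = best + 1 + suf.length := by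
        rw [hqs, ← hplen]; simp; omega
      have hlen' : (qs.drop best).length ≤ m := by
        rw [List.length_drop]; omega
      show pvALoop engines (m + 1) (count + 1) (qs.drop best)
          = pvBLoop (PySem.Set.ofList engines) qs [] count
      rw [ih (qs.drop best) (count + 1) hlen']
      have hdrop : qs.drop best = a :: suf := by
        rw [hqs, ← hplen, List.drop_left]
      rw [hdrop]
      conv_rhs => rw [hqs]
      rw [pvBLoop_prefix (PySem.Set.ofList engines) a hane p [] count (a :: suf) hap
        (List.not_mem_nil) List.nodup_nil (fun x hx => absurd hx (List.not_mem_nil))]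
      have hneed2 : 2 ≤ (PySem.Set.ofList engines).length := by
        rw [← PySem.List.dedup_eq_ofList]; exact h2
      -- the window completes exactly at `a`: the accumulated seen-set plus `a` covers all engines
      have hfull : (PySem.Set.add (pvSeenFold (PySem.Set.ofList engines) [] p) a).length
          = (PySem.Set.ofList engines).length := by
        have hndS : (pvSeenFold (PySem.Set.ofList engines) [] p).Nodup :=
          nodup_pvSeenFold _ p [] List.nodup_nil
        have hnd1 : (PySem.Set.add (pvSeenFold (PySem.Set.ofList engines) [] p) a).Nodup :=
          PySem.Set.nodup_add _ _ hndS
        have hnd2 : (PySem.Set.ofList engines).Nodup := PySem.Set.nodup_ofList engines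
        apply Nat.le_antisymm
        · apply List.Subperm.length_le
          apply hnd1.subperm
          intro z hz
          rw [PySem.Set.mem_add] at hz
          rcases hz with hz | hz
          · exact ((mem_pvSeenFold _ p [] z).mp hz).elim
              (fun h => absurd h (List.not_mem_nil)) (fun h => h.2)
          · exact hz ▸ hane
        · apply List.Subperm.length_le
          apply hnd2.subperm
          intro e he
          rw [PySem.Set.mem_add]
          obtain ⟨i, hie, hile⟩ := hall e ((PySem.Set.mem_ofList ..).mp he)
          obtain ⟨hk, hget, -⟩ := PySem.List.getElem_of_index?_eq_some hie
          obtain ⟨hk2, hget2, -⟩ := PySem.List.getElem_of_index?_eq_some hia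
          rcases Nat.lt_or_ge i best with hlt | hge
          · left
            rw [mem_pvSeenFold]
            refine Or.inr ⟨?_, he⟩
            have hip : i < p.length := by omega
            have heq : qs[i] = p[i] :=
              (List.getElem_of_eq hqs hk).trans (List.getElem_append_left hip)
            rw [← hget, heq]
            exact List.getElem_mem hip
          · right
            have hieq : i = best := by omega
            subst hieq
            rw [← hget, ← hget2]
      simp only [pvBLoop, if_pos hane, if_pos hfull]
      have h1 : (PySem.Set.add ([] : List String) a).length = 1 := rfl
      rw [if_neg (by rw [h1]; omega)]
      rfl

-- ===== VERDICT (by name: the statement is the Claim_ definition above) =====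
theorem saveTheUniverse_spec : Claim_equal_saveTheUniverse := by
  intro engines queries _ hpre
  unfold Spec_saveTheUniverse saveTheUniverse saveTheUniverse_alt
  rcases hpre with hq | h2 | ⟨hne, hall⟩
  · subst hq; rfl
  · exact pvMain engines h2 queries.length queries 0 le_rfl
  · rw [pvBLoop_skip (PySem.Set.ofList engines) queries [] 0
      (fun q hq h => hall q hq ((PySem.Set.mem_ofList ..).mp h))]
    cases hq : queries with
    | nil => rfl
    | cons q0 qs0 =>
      match engines, hne with
      | e :: rest, _ =>
        have hnone : PySem.List.index? (q0 :: qs0) e = none :=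
          (PySem.List.index?_eq_none_iff ..).mpr (fun h => hall e (hq ▸ h) (List.mem_cons_self ..))
        rw [PySem.List.index?_eq_idxOf?] at hnone
        simp [pvALoop, pvForBest, hnone]
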